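-- pv_equiv track=rewrite | github.com/mai1025/tictactoe | tictactoe.py | result
-- ===== SOURCE A (Python) =====
-- X = "X"
--
-- O = "O"
--
-- EMPTY = None
--
-- ROW = 3
--
-- COL = 3
--
-- def player(board):
--     """
--     Returns player who has the next turn on a board.
--     """
--     xCount = sum(row.count(X) for row in board)
--     oCount = sum(row.count(O) for row in board)
--
--     return X if xCount <= oCount else O
--
-- def result(board, action):
--     """
--     Returns the board that results from making move (i, j) on the board.
--     """
--     if board[action[0]][action[1]] != EMPTY:
--         raise NameError('InvalidActionError')
--
--     resultBoard = [[None for _ in range(ROW)] for _ in range(COL)]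
--     curPlayer = player(board)
--
--     for row in range(ROW):
--         for col in range(COL):
--             if row == action[0] and col == action[1]:
--                 resultBoard[row][col] = curPlayer
--             else:
--                 resultBoard[row][col] = board[row][col]
--
--     return resultBoard
-- ===== SOURCE B (Python) =====
-- X = "X"
--
-- O = "O"
--
-- EMPTY = None
--
-- ROW = 3
--
-- COL = 3
--
-- def result(board, action):
--     """
--     Returns the board that results from making move (i, j) on the board.
--     Computes the mover from a single signed-balance pass (X:+1, O:-1) and
--     builds the grid as one flat 9-cell list addressed by divmod, then chunks
--     it into rows.
--     """
--     if board[action[0]][action[1]] != EMPTY: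
--         raise NameError('InvalidActionError')
--
--     balance = 0
--     for row in board:
--         for cell in row:
--             if cell == X:
--                 balance += 1
--             elif cell == O:
--                 balance -= 1
--     curPlayer = X if balance <= 0 else O
--
--     flat = [curPlayer if divmod(k, COL) == action else board[k // COL][k % COL]
--             for k in range(ROW * COL)]
--     return [flat[r * COL:(r + 1) * COL] for r in range(ROW)]
-- ===== Notes on version B (the rewrite author's own statement) =====
-- stated objective: alternative
-- what changed: B determines the mover by a single signed-balance accumulator pass (X:+1, O:-1, play X iff balance <= 0) instead of two per-row count sums, and constructs the result as one flat 9-cell list addressed by divmod (placing the move where divmod(k,COL) equals the action) which is then chunked into rows, instead of a preallocated grid filled by nested row/col index loops.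
import Mathlib
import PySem

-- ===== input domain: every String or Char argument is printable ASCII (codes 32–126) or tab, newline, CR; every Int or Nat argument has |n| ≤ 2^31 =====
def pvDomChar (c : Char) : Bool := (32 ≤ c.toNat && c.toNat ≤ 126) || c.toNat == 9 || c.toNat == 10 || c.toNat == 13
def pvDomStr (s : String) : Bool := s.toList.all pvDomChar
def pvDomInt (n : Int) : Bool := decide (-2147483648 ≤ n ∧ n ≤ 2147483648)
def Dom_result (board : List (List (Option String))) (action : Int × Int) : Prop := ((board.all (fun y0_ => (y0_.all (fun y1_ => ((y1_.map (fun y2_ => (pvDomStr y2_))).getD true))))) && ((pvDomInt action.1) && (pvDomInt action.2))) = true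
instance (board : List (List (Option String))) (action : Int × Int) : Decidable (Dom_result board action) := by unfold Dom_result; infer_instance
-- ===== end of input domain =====

-- B picks the mover by one signed-balance pass and builds the result as a flat divmod-addressed
-- 9-cell list chunked into rows, instead of two count sums plus nested index loops (objective:
-- alternative; return value only — neither version mutates its argument).

-- ===== PORT A =====
-- helper 'player' (module function A calls)
def player (board : List (List (Option String))) : String :=
  let xCount : Int := (board.map (fun row => (PySem.List.count row (some "X") : Int))).sum
  let oCount : Int := (board.map (fun row => (PySem.List.count row (some "O") : Int))).sum
  if xCount ≤ oCount then "X" else "O"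

def result (board : List (List (Option String))) (action : Int × Int) : List (List (Option String)) :=
  match PySem.List.pyGet? board action.1 with
  | none => []      -- IndexError on board[action[0]]: excluded by Pre_result
  | some row0 =>
    match PySem.List.pyGet? row0 action.2 with
    | none => []    -- IndexError on ...[action[1]]: excluded by Pre_result
    | some cell =>
      if cell ≠ none then []   -- raise NameError('InvalidActionError'): excluded by Pre_result
      else
        let curPlayer := player board
        -- nested for-loops filling the preallocated 3×3 resultBoard, cell by cell
        (PySem.List.pyRange 0 3 1).map (fun row =>
          (PySem.List.pyRange 0 3 1).map (fun col =>
            if row = action.1 ∧ col = action.2 then some curPlayer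
            -- board[row][col]; the default is unreachable inside Pre_result (IndexError outside it)
            else PySem.List.pyGetD (PySem.List.pyGetD board row []) col none))

-- ===== PORT B =====
def result_alt (board : List (List (Option String))) (action : Int × Int) : List (List (Option String)) :=
  match PySem.List.pyGet? board action.1 with
  | none => []      -- IndexError on board[action[0]]: excluded by Pre_result
  | some row0 =>
    match PySem.List.pyGet? row0 action.2 with
    | none => []    -- IndexError on ...[action[1]]: excluded by Pre_result
    | some cell =>
      if cell ≠ none then []   -- raise NameError('InvalidActionError'): excluded by Pre_result
      else
        -- signed-balance pass: +1 per X, -1 per O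
        let balance : Int := board.foldl (fun b row =>
          row.foldl (fun b cell =>
            if cell = some "X" then b + 1 else if cell = some "O" then b - 1 else b) b) 0
        let curPlayer := if balance ≤ 0 then "X" else "O"
        -- flat = [cur if divmod(k, COL) == action else board[k // COL][k % COL] for k in range(ROW*COL)]
        let flat := (PySem.List.pyRange 0 9 1).map (fun k =>
          if (PySem.Int.floordiv k 3, PySem.Int.mod k 3) = action then some curPlayer
          else PySem.List.pyGetD (PySem.List.pyGetD board (PySem.Int.floordiv k 3) []) (PySem.Int.mod k 3) none)
        -- [flat[r*COL:(r+1)*COL] for r in range(ROW)]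
        (PySem.List.pyRange 0 3 1).map (fun r =>
          PySem.List.slice flat (some (r * 3)) (some ((r + 1) * 3)))

-- ===== PRECONDITION & SPEC =====
-- Pre_ = exactly the inputs on which the Python A returns: the move's cell exists (Python
-- indexing, negative indices included) and is empty, and the 3×3 field A copies is present
-- (at least 3 rows whose first three rows have at least 3 cells) — outside it A raises
-- IndexError or NameError('InvalidActionError').
def Pre_result (board : List (List (Option String))) (action : Int × Int) : Prop :=
  3 ≤ board.length ∧ (∀ row ∈ board.take 3, 3 ≤ row.length) ∧
  PySem.Raise.InRange board.length action.1 ∧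
  PySem.Raise.InRange (PySem.List.pyGetD board action.1 []).length action.2 ∧
  PySem.List.pyGetD (PySem.List.pyGetD board action.1 []) action.2 none = none
instance (board : List (List (Option String))) (action : Int × Int) : Decidable (Pre_result board action) := by unfold Pre_result; infer_instance

def pvWitness_result : List (List (Option String)) × (Int × Int) :=
  ([[none, none, none], [none, none, none], [none, none, none]], (0, 0))

def Spec_result (board : List (List (Option String))) (action : Int × Int) (out : List (List (Option String))) : Prop := out = result_alt board action
instance (board : List (List (Option String))) (action : Int × Int) (out : List (List (Option String))) : Decidable (Spec_result board action out) := by unfold Spec_result; infer_instance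

-- ===== CLAIM (what is proved, stated in full; the proofs are below) =====
def Claim_equal_result : Prop := ∀ (board : List (List (Option String))) (action : Int × Int), Dom_result board action → Pre_result board action → Spec_result board action (result board action)

-- ===== LEMMAS AND PROOFS =====
-- one row of the balance fold = start + (#X in the row) - (#O in the row)
theorem balance_row (row : List (Option String)) (b : Int) :
    row.foldl (fun b cell =>
        if cell = some "X" then b + 1 else if cell = some "O" then b - 1 else b) b
      = b + (PySem.List.count row (some "X") : Int) - (PySem.List.count row (some "O") : Int) := by
  induction row generalizing b with
  | nil => simp [PySem.List.count]
  | cons c t ih =>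
    rw [List.foldl_cons, ih]
    simp only [PySem.List.count, List.count_cons]
    by_cases hX : c = some "X" <;> by_cases hO : c = some "O" <;> simp [hX, hO] <;> omega

-- the whole balance pass = start + xCount - oCount
theorem balance_eq (board : List (List (Option String))) (b : Int) :
    board.foldl (fun b row =>
        row.foldl (fun b cell =>
          if cell = some "X" then b + 1 else if cell = some "O" then b - 1 else b) b) b
      = b + (board.map (fun row => (PySem.List.count row (some "X") : Int))).sum
          - (board.map (fun row => (PySem.List.count row (some "O") : Int))).sum := by
  induction board generalizing b with
  | nil => simp
  | cons r t ih => rw [List.foldl_cons, balance_row, ih]; simp; ring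

-- hence B's mover is exactly player board
theorem mover_eq (board : List (List (Option String))) :
    (if board.foldl (fun b row =>
        row.foldl (fun b cell =>
          if cell = some "X" then b + 1 else if cell = some "O" then b - 1 else b) b) (0 : Int) ≤ 0
     then "X" else "O") = player board := by
  simp only [player, balance_eq]
  split_ifs with h1 h2 h2 <;> first | rfl | omega

theorem pyRange3 : PySem.List.pyRange 0 3 1 = [0, 1, 2] := by decide

theorem pyRange9 : PySem.List.pyRange 0 9 1 = [0, 1, 2, 3, 4, 5, 6, 7, 8] := by decide

theorem take3_shape (xs : List (List (Option String))) (h : 3 ≤ xs.length) :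
    ∃ a b c t, xs = a :: b :: c :: t := by
  match xs, h with
  | a :: b :: c :: t, _ => exact ⟨a, b, c, t, rfl⟩

theorem row3_shape (r : List (Option String)) (h : 3 ≤ r.length) :
    ∃ x y z t, r = x :: y :: z :: t := by
  match r, h with
  | x :: y :: z :: t, _ => exact ⟨x, y, z, t, rfl⟩

set_option maxHeartbeats 2000000 in
theorem result_eq_alt (board : List (List (Option String))) (action : Int × Int)
    (h : Pre_result board action) : result board action = result_alt board action := by
  obtain ⟨hlen, hrows, -, -, -⟩ := h
  obtain ⟨i, j⟩ := action
  obtain ⟨r0, r1, r2, t, rfl⟩ := take3_shape board hlen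
  obtain ⟨a, b, c, t0, rfl⟩ := row3_shape r0 (hrows _ (by simp))
  obtain ⟨d, e, f, t1, rfl⟩ := row3_shape r1 (hrows _ (by simp))
  obtain ⟨g, p, q, t2, rfl⟩ := row3_shape r2 (hrows _ (by simp))
  unfold result result_alt
  dsimp only
  rcases h1 : PySem.List.pyGet? ((a :: b :: c :: t0) :: (d :: e :: f :: t1) :: (g :: p :: q :: t2) :: t) i with - | row0
  · rfl
  · dsimp only
    rcases h2 : PySem.List.pyGet? row0 j with - | cell
    · rfl
    · dsimp only
      by_cases hc : cell = none
      · subst hc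
        simp only [ne_eq, not_true_eq_false, if_false]
        simp only [mover_eq]
        generalize player ((a :: b :: c :: t0) :: (d :: e :: f :: t1) :: (g :: p :: q :: t2) :: t) = cur
        rw [pyRange3, pyRange9]
        norm_num [pysem, PySem.List.slice, Prod.mk.injEq,
          (show PySem.Int.floordiv 0 3 = 0 from rfl), (show PySem.Int.mod 0 3 = 0 from rfl),
          (show PySem.Int.floordiv 1 3 = 0 from rfl), (show PySem.Int.mod 1 3 = 1 from rfl),
          (show PySem.Int.floordiv 2 3 = 0 from rfl), (show PySem.Int.mod 2 3 = 2 from rfl),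
          (show PySem.Int.floordiv 3 3 = 1 from rfl), (show PySem.Int.mod 3 3 = 0 from rfl),
          (show PySem.Int.floordiv 4 3 = 1 from rfl), (show PySem.Int.mod 4 3 = 1 from rfl),
          (show PySem.Int.floordiv 5 3 = 1 from rfl), (show PySem.Int.mod 5 3 = 2 from rfl),
          (show PySem.Int.floordiv 6 3 = 2 from rfl), (show PySem.Int.mod 6 3 = 0 from rfl),
          (show PySem.Int.floordiv 7 3 = 2 from rfl), (show PySem.Int.mod 7 3 = 1 from rfl),
          (show PySem.Int.floordiv 8 3 = 2 from rfl), (show PySem.Int.mod 8 3 = 2 from rfl)]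
        exact ⟨rfl, rfl, rfl⟩
      · simp only [hc, ne_eq, not_false_eq_true, if_true]

-- ===== VERDICT (by name: the statement is the Claim_ definition above) =====
theorem result_spec : Claim_equal_result := by
  intro board action _ hpre
  unfold Spec_result
  exact result_eq_alt board action hpre
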